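-- pv_equiv track=rewrite | github.com/lucas-lobato/UERJ | fundamentos da computacao/Tarefas/Programa 12.py | calc
-- ===== SOURCE A (Python) =====
-- vogais=['a','e','i','o','u']
--
-- def calc(frase):
--     contador=0
--     contadorE=0
--     for i in range (len(frase)):
--         if frase[i] in vogais:
--             contador=contador+1
--
--         if frase[i] in ' ':
--             contadorE=contadorE+1
--
--     return contador,contadorE
-- ===== SOURCE B (Python) =====
-- vogais=['a','e','i','o','u']
--
-- def calc(frase):
--     # One tally pass over the string, then dictionary lookups per vowel / space.
--     tally = {}
--     for c in frase:
--         tally[c] = tally.get(c, 0) + 1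
--     contador = sum(tally.get(v, 0) for v in vogais)
--     contadorE = tally.get(' ', 0)
--     return contador, contadorE
-- ===== Notes on version B (the rewrite author's own statement) =====
-- stated objective: faster
-- what changed: B builds a character-frequency dictionary in one pass and then reads the five vowel counts and the space count out of it, instead of A's per-index loop testing each character against the vowel list and against the space string.
import Mathlib
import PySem

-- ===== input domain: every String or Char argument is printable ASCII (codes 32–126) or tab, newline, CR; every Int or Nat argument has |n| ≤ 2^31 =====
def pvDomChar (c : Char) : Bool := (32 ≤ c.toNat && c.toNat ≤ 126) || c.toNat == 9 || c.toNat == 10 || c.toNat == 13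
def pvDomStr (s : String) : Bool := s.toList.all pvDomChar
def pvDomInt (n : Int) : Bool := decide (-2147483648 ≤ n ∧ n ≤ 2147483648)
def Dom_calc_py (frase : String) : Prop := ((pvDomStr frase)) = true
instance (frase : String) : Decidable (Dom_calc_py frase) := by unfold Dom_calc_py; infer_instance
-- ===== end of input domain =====

-- B replaces A's per-character vowel-list/space tests by one frequency-dictionary pass plus lookups; equal result proved below.

-- ===== PORT A =====
def pvVogais : List Char := ['a', 'e', 'i', 'o', 'u']

-- A's index loop visits each character once; ported as a fold over the characters
-- with the pair (contador, contadorE) as state, branches in A's order.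
def calc_py (frase : String) : Int × Int :=
  frase.toList.foldl
    (fun (st : Int × Int) c =>
      let contador := if c ∈ pvVogais then st.1 + 1 else st.1
      let contadorE := if c == ' ' then st.2 + 1 else st.2
      (contador, contadorE))
    (0, 0)

-- ===== PORT B =====
def calc_py_alt (frase : String) : Int × Int :=
  let tally : PySem.Dict Char Int :=
    frase.toList.foldl (fun d c => d.insert c (d.getD c 0 + 1)) PySem.Dict.empty
  let contador := (pvVogais.map (fun v => tally.getD v 0)).sum
  let contadorE := tally.getD ' ' 0
  (contador, contadorE)

-- ===== PRECONDITION & SPEC =====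
def Spec_calc_py (frase : String) (out : Int × Int) : Prop := out = calc_py_alt frase
instance (frase : String) (out : Int × Int) : Decidable (Spec_calc_py frase out) := by unfold Spec_calc_py; infer_instance

-- ===== CLAIM (what is proved, stated in full; the proofs are below) =====
def Claim_equal_calc_py : Prop := ∀ (frase : String), Dom_calc_py frase → Spec_calc_py frase (calc_py frase)

-- ===== LEMMAS AND PROOFS =====

theorem calc_py_fold_eq (l : List Char) (a b : Int) :
    l.foldl
      (fun (st : Int × Int) c =>
        let contador := if c ∈ pvVogais then st.1 + 1 else st.1
        let contadorE := if c == ' ' then st.2 + 1 else st.2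
        (contador, contadorE))
      (a, b)
    = (a + (l.countP (· ∈ pvVogais) : Int), b + (l.count ' ' : Int)) := by
  induction l generalizing a b with
  | nil => simp
  | cons c t ih =>
    simp only [List.foldl_cons, List.countP_cons, List.count_cons, ih]
    by_cases hv : c ∈ pvVogais <;> by_cases hs : c = ' ' <;>
      simp_all [Prod.ext_iff, pvVogais] <;> omega

theorem countP_vogais (l : List Char) :
    (l.countP (· ∈ pvVogais) : Int)
      = (l.count 'a' : Int) + l.count 'e' + l.count 'i' + l.count 'o' + l.count 'u' := by
  induction l with
  | nil => simp
  | cons c t ih =>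
    simp only [List.countP_cons, List.count_cons, pvVogais]
    by_cases h1 : c = 'a' <;> by_cases h2 : c = 'e' <;> by_cases h3 : c = 'i' <;>
      by_cases h4 : c = 'o' <;> by_cases h5 : c = 'u' <;>
      simp_all [pvVogais] <;> omega

-- ===== VERDICT (by name: the statement is the Claim_ definition above) =====
theorem calc_py_spec : Claim_equal_calc_py := by
  intro frase _
  show calc_py frase = calc_py_alt frase
  rw [calc_py, calc_py_fold_eq, countP_vogais]
  simp only [calc_py_alt, PySem.Dict.getD_foldl_insert_add_one, pvVogais,
    List.map, List.sum_cons, List.sum_nil]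
  simp [PySem.Dict.getD, PySem.Dict.empty, PySem.Dict.get?]
  ring
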